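-- pv_equiv track=rewrite | github.com/dinleo/CodeTest | PyCode/Programmers_Test/Company/Gauss/Gauss_2022/1.py | solution
-- ===== SOURCE A (Python) =====
-- def solution(x, y):
--     answer = -1
--
--     dots = []
--     for i in range(len(x)):
--         dots.append([x[i], y[i]])
--     dots.sort(key=lambda k: k[0])
--     dots.sort(key=lambda k: k[1])
--
--     pairs = []
--     i = 0
--     while i < len(dots):
--         i_y = dots[i][1]
--         arr = [0, 0]
--         j = i + 1
--         while j < len(dots):
--             if dots[j][1] == i_y:
--                 arr[0] = dots[i]
--                 arr[1] = dots[j]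
--                 j += 1
--             else:
--                 break
--         if arr != [0,0]:
--             pairs.append(arr)
--         i = j
--
--     p = len(pairs)
--     if p<2:
--         return 0
--     for i in range(p):
--         for j in range(i+1, p):
--             a = pairs[i][1][0] - pairs[i][0][0]
--             b = pairs[j][1][0] - pairs[j][0][0]
--             h = pairs[j][0][1] - pairs[i][0][1]
--             s = (a+b)*h
--             if answer < s:
--                 answer = s
--
--     return answer
-- ===== SOURCE B (Python) =====
-- def solution(x, y):
--     levels = {}
--     for i in range(len(x)):
--         yi = y[i]
--         xi = x[i]
--         if yi in levels:
--             lo, hi, c = levels[yi]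
--             levels[yi] = (min(lo, xi), max(hi, xi), c + 1)
--         else:
--             levels[yi] = (xi, xi, 1)
--     lv = sorted(
--         [(yy, hi - lo) for yy, (lo, hi, c) in levels.items() if c >= 2],
--         key=lambda t: t[0],
--     )
--     best = -1
--     if len(lv) < 2:
--         return 0
--     for i in range(len(lv)):
--         for j in range(i + 1, len(lv)):
--             s = (lv[i][1] + lv[j][1]) * (lv[j][0] - lv[i][0])
--             if best < s:
--                 best = s
--     return best
-- ===== Notes on version B (the rewrite author's own statement) =====
-- stated objective: faster
-- what changed: B replaces A's double stable sort of all n points plus an index-based while-loop run scan by a single pass building a dict from each y-level to (min_x, max_x, count), keeps levels with >=2 points, sorts only the reduced level list, and runs the same-shape pair loop over (y, width) levels.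
import Mathlib
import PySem

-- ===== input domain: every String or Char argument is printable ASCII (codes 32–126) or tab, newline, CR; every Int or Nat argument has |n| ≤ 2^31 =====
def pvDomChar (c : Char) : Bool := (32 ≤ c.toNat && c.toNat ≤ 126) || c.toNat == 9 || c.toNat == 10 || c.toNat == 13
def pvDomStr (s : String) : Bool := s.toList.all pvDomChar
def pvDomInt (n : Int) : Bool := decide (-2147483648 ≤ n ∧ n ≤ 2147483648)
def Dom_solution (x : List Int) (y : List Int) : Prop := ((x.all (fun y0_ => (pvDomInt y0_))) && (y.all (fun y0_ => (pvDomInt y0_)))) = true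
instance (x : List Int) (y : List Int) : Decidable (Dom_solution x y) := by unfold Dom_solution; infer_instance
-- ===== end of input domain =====

-- B replaces A's double stable sort of all points + index while-loop run scan by a one-pass
-- per-y-level dict of (min_x, max_x, count); same return value on every input where A returns.

-- ===== PORT A =====
-- A's middle while-loops: walk the (y,x)-sorted points, and for each maximal run of equal y
-- with ≥ 2 points emit (first point of run, last point of run).
def solutionGroup : List (Int × Int) → List ((Int × Int) × (Int × Int))
  | [] => []
  | d :: rest =>
    let run := rest.takeWhile (fun p => p.2 == d.2)
    if hr : run = [] then solutionGroup (rest.dropWhile (fun p => p.2 == d.2))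
    else (d, run.getLast hr) :: solutionGroup (rest.dropWhile (fun p => p.2 == d.2))
  termination_by l => l.length
  decreasing_by
    all_goals exact Nat.lt_succ_of_le (List.length_dropWhile_le _ _)

def solution (x : List Int) (y : List Int) : Int :=
  let dots : List (Int × Int) :=
    (PySem.List.pyRange 0 (x.length : Int)).foldl
      (fun acc i => acc ++ [(PySem.List.pyGetD x i 0, PySem.List.pyGetD y i 0)]) []
  let dots1 := PySem.List.sorted dots (fun k => k.1)
  let dots2 := PySem.List.sorted dots1 (fun k => k.2)
  let pairs := solutionGroup dots2
  let p : Int := (pairs.length : Int)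
  if p < 2 then 0
  else
    (PySem.List.pyRange 0 p).foldl (fun answer i =>
      (PySem.List.pyRange (i + 1) p).foldl (fun answer j =>
        let pri := PySem.List.pyGetD pairs i ((0, 0), (0, 0))
        let prj := PySem.List.pyGetD pairs j ((0, 0), (0, 0))
        let a := pri.2.1 - pri.1.1
        let b := prj.2.1 - prj.1.1
        let h := prj.1.2 - pri.1.2
        let s := (a + b) * h
        if answer < s then s else answer) answer) (-1)

-- ===== PORT B =====
-- 'if yi in levels: … else: …' (both branches assign levels[yi]) is ported as one insert
-- whose value is a match on get? (exact: Python's dict overwrite at key yi in both branches).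
def solution_alt (x : List Int) (y : List Int) : Int :=
  let levels : PySem.Dict Int (Int × Int × Int) :=
    (PySem.List.pyRange 0 (x.length : Int)).foldl
      (fun d i =>
        d.insert (PySem.List.pyGetD y i 0)
          (match d.get? (PySem.List.pyGetD y i 0) with
            | some (lo, hi, c) => (min lo (PySem.List.pyGetD x i 0), max hi (PySem.List.pyGetD x i 0), c + 1)
            | none => (PySem.List.pyGetD x i 0, PySem.List.pyGetD x i 0, 1)))
      PySem.Dict.empty
  let lv := PySem.List.sorted
      ((levels.items.filter (fun p => 2 ≤ p.2.2.2)).map (fun p => (p.1, p.2.2.1 - p.2.1)))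
      (fun t => t.1)
  if (lv.length : Int) < 2 then 0
  else
    (PySem.List.pyRange 0 (lv.length : Int)).foldl (fun best i =>
      (PySem.List.pyRange (i + 1) (lv.length : Int)).foldl (fun best j =>
        let s := ((PySem.List.pyGetD lv i (0, 0)).2 + (PySem.List.pyGetD lv j (0, 0)).2)
                 * ((PySem.List.pyGetD lv j (0, 0)).1 - (PySem.List.pyGetD lv i (0, 0)).1)
        if best < s then s else best) best) (-1)

-- ===== PRECONDITION & SPEC =====
-- A indexes y[i] for every i < len(x), so it raises IndexError iff len(y) < len(x); Pre_
-- excludes exactly those inputs (B raises there too).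
def Pre_solution (x : List Int) (y : List Int) : Prop := x.length ≤ y.length
instance (x : List Int) (y : List Int) : Decidable (Pre_solution x y) := by
  unfold Pre_solution; infer_instance

def pvWitness_solution : List Int × List Int := ([1, 3, 0, 4], [0, 0, 2, 2])

def Spec_solution (x : List Int) (y : List Int) (out : Int) : Prop := out = solution_alt x y
instance (x : List Int) (y : List Int) (out : Int) : Decidable (Spec_solution x y out) := by
  unfold Spec_solution; infer_instance

-- ===== CLAIM (what is proved, stated in full; the proofs are below) =====
def Claim_equal_solution : Prop :=
  ∀ (x : List Int) (y : List Int), Dom_solution x y → Pre_solution x y →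
    Spec_solution x y (solution x y)

-- ===== LEMMAS AND PROOFS =====

-- proof-side vocabulary: pts = zip(x, y); per level Y its x-coordinates, min, max, width entry
def pvGrp (pts : List (Int × Int)) (Y : Int) : List Int :=
  (pts.filter (fun p => p.2 == Y)).map (fun p => p.1)

def pvMn (pts : List (Int × Int)) (Y : Int) : Int :=
  match pvGrp pts Y with | [] => 0 | a :: t => t.foldl min a

def pvMx (pts : List (Int × Int)) (Y : Int) : Int :=
  match pvGrp pts Y with | [] => 0 | a :: t => t.foldl max a

def pvLv (pts : List (Int × Int)) (Y : Int) : Int × Int := (Y, pvMx pts Y - pvMn pts Y)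

def pvKeep (pts : List (Int × Int)) (Y : Int) : Bool := decide (2 ≤ (pvGrp pts Y).length)

def pvPiece (pts : List (Int × Int)) (Y : Int) : List (Int × Int) :=
  (PySem.List.sorted (pvGrp pts Y) (fun v => v)).map (fun v => (v, Y))

def pvYs (pts : List (Int × Int)) : List Int :=
  PySem.List.sorted (PySem.Set.ofList (pts.map (fun p => p.2))) (fun v => v)

def pvCanon (pts : List (Int × Int)) : List (Int × Int) :=
  (pvYs pts).flatMap (pvPiece pts)

-- the lex order A's two stable sorts realize
def pvLex (a b : Int × Int) : Prop := a.2 < b.2 ∨ (a.2 = b.2 ∧ a.1 ≤ b.1)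

-- B's dict-building step, on a (x_i, y_i) point
def pvStep (d : PySem.Dict Int (Int × Int × Int)) (q : Int × Int) : PySem.Dict Int (Int × Int × Int) :=
  d.insert q.2
    (match d.get? q.2 with
      | some (lo, hi, c) => (min lo q.1, max hi q.1, c + 1)
      | none => (q.1, q.1, 1))

theorem foldl_range_zip {σ : Type} (x y : List Int) (h : x.length ≤ y.length)
    (g : σ → Int → Int → σ) (init : σ) :
    (PySem.List.pyRange 0 (x.length : Int)).foldl
        (fun s i => g s (PySem.List.pyGetD x i 0) (PySem.List.pyGetD y i 0)) init
      = (x.zip y).foldl (fun s q => g s q.1 q.2) init := by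
  suffices h' : ∀ (n k : Nat) (init : σ), n = x.length - k → k ≤ x.length →
      (PySem.List.pyRange (k : Int) (x.length : Int)).foldl
        (fun s i => g s (PySem.List.pyGetD x i 0) (PySem.List.pyGetD y i 0)) init
      = ((x.drop k).zip (y.drop k)).foldl (fun s q => g s q.1 q.2) init by
    simpa using h' x.length 0 init (by omega) (Nat.zero_le _)
  intro n
  induction n with
  | zero =>
    intro k init hn hk
    have hkx : k = x.length := by omega
    subst hkx
    rw [show (PySem.List.pyRange (x.length : Int) (x.length : Int)) = [] from by simp [pysem]]
    simp [List.drop_length]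
  | succ n ih =>
    intro k init hn hk
    have hklt : k < x.length := by omega
    have hky : k < y.length := lt_of_lt_of_le hklt h
    rw [PySem.List.pyRange_one_cons (by exact_mod_cast hklt)]
    simp only [List.foldl_cons]
    have hx : PySem.List.pyGetD x (k : Int) 0 = x[k] := by
      rw [PySem.List.pyGetD_natCast]; exact List.getD_eq_getElem _ _ hklt
    have hy : PySem.List.pyGetD y (k : Int) 0 = y[k] := by
      rw [PySem.List.pyGetD_natCast]; exact List.getD_eq_getElem _ _ hky
    rw [hx, hy, List.drop_eq_getElem_cons hklt, List.drop_eq_getElem_cons hky,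
        List.zip_cons_cons, List.foldl_cons]
    have : ((k : Int) + 1) = ((k + 1 : Nat) : Int) := by push_cast; ring
    rw [this]
    exact ih (k + 1) _ (by omega) (by omega)

theorem insertBy_pres (x : Int × Int) (ys : List (Int × Int))
    (hpw : ys.Pairwise pvLex) (hx : ∀ a ∈ ys, a.1 ≤ x.1) :
    (PySem.List.insertBy (fun a b => decide (a.2 < b.2)) x ys).Pairwise pvLex := by
  induction ys with
  | nil => simp [PySem.List.insertBy]
  | cons yh yt ih =>
    rw [List.pairwise_cons] at hpw
    by_cases hlt : x.2 < yh.2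
    · rw [show PySem.List.insertBy (fun a b => decide (a.2 < b.2)) x (yh :: yt)
            = x :: yh :: yt from by simp [PySem.List.insertBy, hlt]]
      refine List.pairwise_cons.mpr ⟨?_, List.pairwise_cons.mpr hpw⟩
      intro z hz
      rcases List.mem_cons.mp hz with rfl | hz'
      · exact Or.inl hlt
      · have := hpw.1 z hz'
        rcases this with h2 | ⟨h2, _⟩
        · exact Or.inl (lt_trans hlt h2)
        · exact Or.inl (h2 ▸ hlt)
    · rw [show PySem.List.insertBy (fun a b => decide (a.2 < b.2)) x (yh :: yt)
            = yh :: PySem.List.insertBy (fun a b => decide (a.2 < b.2)) x yt from by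
          simp [PySem.List.insertBy, hlt]]
      refine List.pairwise_cons.mpr ⟨?_, ih hpw.2 (fun a ha => hx a (List.mem_cons_of_mem _ ha))⟩
      intro z hz
      rcases (PySem.List.mem_insertBy _ _ _ _).mp hz with rfl | hz'
      · rcases lt_or_eq_of_le (not_lt.mp hlt) with h2 | h2
        · exact Or.inl h2
        · exact Or.inr ⟨h2, hx yh (List.mem_cons_self)⟩
      · exact hpw.1 z hz'

theorem foldl_insertBy_stable : ∀ (l acc : List (Int × Int)), acc.Pairwise pvLex →
    (∀ a ∈ acc, ∀ b ∈ l, a.1 ≤ b.1) → l.Pairwise (fun a b => a.1 ≤ b.1) →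
    (l.foldl (fun acc x => PySem.List.insertBy (fun a b => decide (a.2 < b.2)) x acc) acc).Pairwise pvLex := by
  intro l
  induction l with
  | nil => intro acc h _ _; simpa using h
  | cons x l' ih =>
    intro acc hacc hx hl
    rw [List.foldl_cons]
    refine ih _ (insertBy_pres x acc hacc (fun a ha => hx a ha x List.mem_cons_self)) ?_ (List.pairwise_cons.mp hl).2
    intro a ha b hb
    rcases (PySem.List.mem_insertBy _ _ _ _).mp ha with rfl | ha'
    · exact List.pairwise_cons.mp hl |>.1 b hb
    · exact hx a ha' b (List.mem_cons_of_mem _ hb)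

theorem sorted_snd_stable (l : List (Int × Int))
    (h : l.Pairwise (fun a b => a.1 ≤ b.1)) :
    (PySem.List.sorted l (fun k => k.2)).Pairwise pvLex := by
  rw [PySem.List.sorted_eq_foldl_insertBy]
  exact foldl_insertBy_stable l [] (by simp) (by simp) h

theorem piece_perm (pts : List (Int × Int)) (Y : Int) :
    (pvPiece pts Y).Perm (pts.filter (fun p => p.2 == Y)) := by
  have h1 : (pvPiece pts Y).Perm ((pvGrp pts Y).map (fun v => (v, Y))) :=
    (PySem.List.sorted_perm _ _ _).map _
  refine h1.trans ?_
  rw [pvGrp, List.map_map]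
  rw [List.map_congr_left (fun p hp => ?_), List.map_id]
  have : p.2 = Y := by simpa using (List.of_mem_filter hp)
  simp [Function.comp, ← this]

theorem perm_flatMap_congr {α β : Type} (K : List α) (f g : α → List β)
    (h : ∀ a ∈ K, (f a).Perm (g a)) : (K.flatMap f).Perm (K.flatMap g) := by
  induction K with
  | nil => simp
  | cons a K' ih =>
    simp only [List.flatMap_cons]
    exact (h a List.mem_cons_self).append (ih (fun b hb => h b (List.mem_cons_of_mem _ hb)))

theorem flatMap_filter_perm (pts : List (Int × Int)) :
    ∀ (K : List Int), K.Nodup →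
      (K.flatMap (fun Y => pts.filter (fun p => p.2 == Y))).Perm
        (pts.filter (fun p => decide (p.2 ∈ K))) := by
  intro K
  induction K with
  | nil => simp
  | cons Y K' ih =>
    intro hnd
    rw [List.nodup_cons] at hnd
    simp only [List.flatMap_cons]
    have hsplit : ((pts.filter (fun p => decide (p.2 ∈ Y :: K'))).filter (fun p => p.2 == Y)
        ++ (pts.filter (fun p => decide (p.2 ∈ Y :: K'))).filter (fun p => !(p.2 == Y))).Perm
        (pts.filter (fun p => decide (p.2 ∈ Y :: K'))) :=
      List.filter_append_perm _ _
    have e1 : (pts.filter (fun p => decide (p.2 ∈ Y :: K'))).filter (fun p => p.2 == Y)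
        = pts.filter (fun p => p.2 == Y) := by
      rw [List.filter_filter]
      refine List.filter_congr (fun a _ => ?_)
      by_cases h : a.2 = Y <;> simp [h]
    have e2 : (pts.filter (fun p => decide (p.2 ∈ Y :: K'))).filter (fun p => !(p.2 == Y))
        = pts.filter (fun p => decide (p.2 ∈ K')) := by
      rw [List.filter_filter]
      refine List.filter_congr (fun a _ => ?_)
      by_cases h : a.2 = Y
      · subst h; simp [hnd.1]
      · simp [h]
    rw [e1, e2] at hsplit
    exact ((List.Perm.refl _).append (ih hnd.2)).trans hsplit

theorem canon_perm (pts : List (Int × Int)) : (pvCanon pts).Perm pts := by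
  rw [pvCanon]
  have h1 : ((pvYs pts).flatMap (pvPiece pts)).Perm
      ((pvYs pts).flatMap (fun Y => pts.filter (fun p => p.2 == Y))) :=
    perm_flatMap_congr _ _ _ (fun Y _ => piece_perm pts Y)
  have hnd : (pvYs pts).Nodup := by
    have := PySem.List.sorted_ofList_pairwise_lt (pts.map (fun p => p.2))
    have hpw := (PySem.List.sorted_ofList_pairwise_lt (pts.map (fun p => p.2))).imp
      (fun {a b} (h : a < b) => (ne_of_lt h : a ≠ b))
    exact hpw
  refine (h1.trans (flatMap_filter_perm pts _ hnd)).trans ?_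
  rw [List.filter_eq_self.mpr]
  intro p hp
  simp only [decide_eq_true_eq, pvYs, PySem.List.mem_sorted, PySem.Set.mem_ofList]
  exact List.mem_map_of_mem hp


theorem mem_piece_snd {pts : List (Int × Int)} {Y : Int} {p : Int × Int}
    (hp : p ∈ pvPiece pts Y) : p.2 = Y := by
  rw [pvPiece] at hp
  obtain ⟨v, _, rfl⟩ := List.mem_map.mp hp
  rfl

theorem piece_pairwise (pts : List (Int × Int)) (Y : Int) :
    (pvPiece pts Y).Pairwise pvLex := by
  rw [pvPiece, List.pairwise_map]
  exact (PySem.List.sorted_pairwise (pvGrp pts Y) (fun v => v)).imp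
    (fun h => Or.inr ⟨rfl, h⟩)

theorem flat_pairwise (pts : List (Int × Int)) :
    ∀ (K : List Int), K.Pairwise (· < ·) → (K.flatMap (pvPiece pts)).Pairwise pvLex := by
  intro K
  induction K with
  | nil => simp
  | cons Y K' ih =>
    intro hK
    rw [List.pairwise_cons] at hK
    rw [List.flatMap_cons]
    refine List.pairwise_append.mpr ⟨piece_pairwise pts Y, ih hK.2, ?_⟩
    intro a ha b hb
    obtain ⟨Y', hY', hbY'⟩ := List.mem_flatMap.mp hb
    left
    rw [mem_piece_snd ha, mem_piece_snd hbY']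
    exact hK.1 Y' hY'

theorem canon_pairwise (pts : List (Int × Int)) : (pvCanon pts).Pairwise pvLex :=
  flat_pairwise pts _ (PySem.List.sorted_ofList_pairwise_lt (pts.map (fun p => p.2)))


theorem lex_iff (a b : Int × Int) :
    pvLex a b ↔ (toLex (a.2, a.1) : Int ×ₗ Int) ≤ toLex (b.2, b.1) := by
  rw [Prod.Lex.toLex_le_toLex]; rfl

theorem double_sort_eq_canon (pts : List (Int × Int)) :
    PySem.List.sorted (PySem.List.sorted pts (fun k => k.1)) (fun k => k.2) = pvCanon pts := by
  have hs : (PySem.List.sorted (PySem.List.sorted pts (fun k => k.1)) (fun k => k.2)).Pairwise pvLex :=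
    sorted_snd_stable _ (PySem.List.sorted_pairwise pts (fun k => k.1))
  have hperm : (PySem.List.sorted (PySem.List.sorted pts (fun k => k.1)) (fun k => k.2)).Perm (pvCanon pts) :=
    ((PySem.List.sorted_perm _ _ _).trans (PySem.List.sorted_perm _ _ _)).trans (canon_perm pts).symm
  refine PySem.List.eq_of_perm_of_pairwise_le_of_injective
    (fun p => (toLex (p.2, p.1) : Int ×ₗ Int)) ?_ hperm ?_ ?_
  · intro a b h
    have := toLex.injective h
    exact Prod.ext (congrArg Prod.snd this) (congrArg Prod.fst this)
  · exact hs.imp (fun h => (lex_iff _ _).mp h)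
  · exact (canon_pairwise pts).imp (fun h => (lex_iff _ _).mp h)

theorem sorted_id_spec (a : Int) (t : List Int) :
    ∃ t₂, PySem.List.sorted (a :: t) (fun v => v) = (t.foldl min a) :: t₂ ∧
      ((t.foldl min a) :: t₂).getLast? = some (t.foldl max a) := by
  have hlen : (PySem.List.sorted (a :: t) (fun v => v)).length = t.length + 1 :=
    PySem.List.length_sorted _ _ _
  obtain ⟨m, t₂, hs⟩ : ∃ m t₂, PySem.List.sorted (a :: t) (fun v => v) = m :: t₂ := by
    cases h : PySem.List.sorted (a :: t) (fun v => v) with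
    | nil => rw [h] at hlen; simp at hlen
    | cons m t₂ => exact ⟨m, t₂, rfl⟩
  have hmem : ∀ z : Int, z ∈ PySem.List.sorted (a :: t) (fun v => v) ↔ z ∈ a :: t :=
    fun z => (PySem.List.sorted_perm _ _ _).mem_iff
  have hfminmem : t.foldl min a ∈ a :: t := by
    rcases PySem.List.foldl_min_mem t a with h' | h'
    · rw [h']; exact List.mem_cons_self
    · exact List.mem_cons_of_mem _ h'
  have hfmaxmem : t.foldl max a ∈ a :: t := by
    rcases PySem.List.foldl_max_mem t a with h' | h'
    · rw [h']; exact List.mem_cons_self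
    · exact List.mem_cons_of_mem _ h'
  have hm : m = t.foldl min a := by
    have h1 : ∀ y ∈ a :: t, m ≤ y := PySem.List.key_head_sorted_le _ _ hs
    have h2 := PySem.List.foldl_min_le t a
    have hmm : m ∈ a :: t := by
      rw [← hmem, hs]; exact List.mem_cons_self
    refine le_antisymm (h1 _ hfminmem) ?_
    rcases List.mem_cons.mp hmm with rfl | hmt
    · exact h2.1
    · exact h2.2 _ hmt
  have hne : PySem.List.sorted (a :: t) (fun v => v) ≠ [] := by
    rw [hs]; exact List.cons_ne_nil _ _
  have hub : ∀ z ∈ a :: t, z ≤ (PySem.List.sorted (a :: t) (fun v => v)).getLast hne := by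
    intro z hz
    obtain ⟨i, hi, rfl⟩ := List.mem_iff_getElem.mp ((hmem z).mpr hz)
    rw [List.getLast_eq_getElem]
    exact PySem.List.key_sorted_getElem_mono (a :: t) (fun v => v) (by omega) (by omega)
  have hLmem : (PySem.List.sorted (a :: t) (fun v => v)).getLast hne ∈ a :: t :=
    (hmem _).mp (List.getLast_mem hne)
  have hlast : (PySem.List.sorted (a :: t) (fun v => v)).getLast hne = t.foldl max a := by
    have h2 := PySem.List.le_foldl_max t a
    refine le_antisymm ?_ (hub _ hfmaxmem)
    rcases List.mem_cons.mp hLmem with h' | h'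
    · rw [h']; exact h2.1
    · exact h2.2 _ h'
  refine ⟨t₂, by rw [← hm]; exact hs, ?_⟩
  rw [← hm, ← hs, List.getLast?_eq_some_getLast hne, hlast]

theorem takeWhile_all_append {α : Type} (p : α → Bool) (u v : List α)
    (hu : ∀ a ∈ u, p a = true) (hv : ∀ a ∈ v, p a = false) :
    (u ++ v).takeWhile p = u ∧ (u ++ v).dropWhile p = v := by
  induction u with
  | nil =>
    simp only [List.nil_append]
    cases v with
    | nil => simp
    | cons b v' =>
      rw [List.takeWhile_cons_of_neg, List.dropWhile_cons_of_neg] <;>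
        simp [hv b List.mem_cons_self]
  | cons a u' ih =>
    have hpa := hu a List.mem_cons_self
    rw [List.cons_append, List.takeWhile_cons_of_pos hpa, List.dropWhile_cons_of_pos hpa]
    have := ih (fun b hb => hu b (List.mem_cons_of_mem _ hb))
    exact ⟨by rw [this.1], this.2⟩

theorem group_flat (pts : List (Int × Int)) : ∀ (K : List Int),
    K.Pairwise (· < ·) → (∀ Y ∈ K, pvGrp pts Y ≠ []) →
    solutionGroup (K.flatMap (pvPiece pts))
      = (K.filter (pvKeep pts)).map (fun Y => ((pvMn pts Y, Y), (pvMx pts Y, Y))) := by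
  intro K
  induction K with
  | nil => intro _ _; simp [solutionGroup]
  | cons Y K' ih =>
    intro hK hne
    rw [List.pairwise_cons] at hK
    obtain ⟨a, t, hg⟩ : ∃ a t, pvGrp pts Y = a :: t := by
      cases h : pvGrp pts Y with
      | nil => exact absurd h (hne Y List.mem_cons_self)
      | cons a t => exact ⟨a, t, rfl⟩
    obtain ⟨t₂, hsrt, hlast⟩ := sorted_id_spec a t
    have hlen2 : t.length = t₂.length := by
      have := PySem.List.length_sorted (a :: t) (fun v => v) false
      rw [hsrt] at this
      simpa using this.symm
    have hpiece : pvPiece pts Y = (t.foldl min a, Y) :: t₂.map (fun v => (v, Y)) := by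
      rw [pvPiece, hg, hsrt, List.map_cons]
    have hrest_snd : ∀ p ∈ K'.flatMap (pvPiece pts), (p.2 == Y) = false := by
      intro p hp
      obtain ⟨Y', hY', hpY'⟩ := List.mem_flatMap.mp hp
      have h2 : p.2 = Y' := mem_piece_snd hpY'
      have hYY : Y < Y' := hK.1 Y' hY'
      rw [h2]; simp; omega
    have hrun_snd : ∀ p ∈ t₂.map (fun v => (v, Y)), (p.2 == Y) = true := by
      intro p hp; obtain ⟨v, _, rfl⟩ := List.mem_map.mp hp; simp
    have htw := takeWhile_all_append (fun p => (p.2 == Y)) (t₂.map (fun v => (v, Y)))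
      (K'.flatMap (pvPiece pts)) hrun_snd hrest_snd
    rw [List.flatMap_cons, hpiece, List.cons_append, solutionGroup]
    simp only []
    have hmn : pvMn pts Y = t.foldl min a := by rw [pvMn, hg]
    have hmx : pvMx pts Y = t.foldl max a := by rw [pvMx, hg]
    cases t₂ with
    | nil =>
      have hkeep : pvKeep pts Y = false := by
        have ht0 : t.length = 0 := by simpa using hlen2
        rw [pvKeep, hg]; simp [ht0]
      rw [List.filter_cons_of_neg (by rw [hkeep]; simp)]
      simp only [List.map_nil] at htw ⊢
      simp only [List.nil_append] at htw ⊢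
      simp only [htw.1, htw.2, dif_pos]
      exact ih hK.2 (fun Z hZ => hne Z (List.mem_cons_of_mem _ hZ))
    | cons c t₂' =>
      have hkeep : pvKeep pts Y = true := by
        have ht1 : t.length = t₂'.length + 1 := by simpa using hlen2
        rw [pvKeep, hg]; simp [ht1]
      have hrun_ne : ((c :: t₂').map (fun v => (v, Y))) ≠ [] := by simp
      simp only [htw.1, htw.2, dif_neg hrun_ne]
      have hgl : ((c :: t₂').map (fun v => (v, Y))).getLast hrun_ne = (t.foldl max a, Y) := by
        have h1 : ((c :: t₂').map (fun v => (v, Y))).getLast? = some (t.foldl max a, Y) := by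
          rw [List.getLast?_map]
          have : (c :: t₂').getLast? = some (t.foldl max a) := by
            have := hlast
            rwa [List.getLast?_cons_cons] at this
          rw [this]; rfl
        have h2 := List.getLast?_eq_some_getLast hrun_ne
        rw [h1] at h2
        exact (Option.some_inj.mp h2).symm
      rw [hgl, List.filter_cons_of_pos (by rw [hkeep]), List.map_cons, hmn, hmx]
      rw [ih hK.2 (fun Z hZ => hne Z (List.mem_cons_of_mem _ hZ))]

theorem levels_get? (pts : List (Int × Int)) (Y : Int) :
    (pts.foldl pvStep (PySem.Dict.empty : PySem.Dict Int (Int × Int × Int))).get? Y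
      = match pvGrp pts Y with
        | [] => none
        | a :: t => some (t.foldl min a, t.foldl max a, ((a :: t).length : Int)) := by
  induction pts using List.reverseRecOn with
  | nil => simp [pvGrp, PySem.Dict.get?_empty]
  | append_singleton l p ih =>
    rw [List.foldl_append, List.foldl_cons, List.foldl_nil]
    have hgrp : pvGrp (l ++ [p]) Y
        = pvGrp l Y ++ (if p.2 == Y then [p.1] else []) := by
      rw [pvGrp, pvGrp, List.filter_append, List.map_append]
      congr 1
      by_cases h : p.2 = Y <;> simp [h]
    by_cases hpy : p.2 = Y
    · rw [pvStep]
      rw [hpy, PySem.Dict.get?_insert_self, ih, hgrp]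
      cases hg : pvGrp l Y with
      | nil => simp [hpy]
      | cons a t =>
        simp only [hpy, beq_self_eq_true, if_pos]
        simp [List.foldl_append]
    · rw [pvStep, PySem.Dict.get?_insert_of_ne _ _ (Ne.symm hpy), ih, hgrp]
      simp [hpy]

theorem keys_levels (pts : List (Int × Int)) :
    (pts.foldl pvStep (PySem.Dict.empty : PySem.Dict Int (Int × Int × Int))).keys
      = PySem.Set.ofList (pts.map (fun p => p.2)) := by
  have : pts.foldl pvStep (PySem.Dict.empty : PySem.Dict Int (Int × Int × Int))
      = pts.foldl (fun d q => d.insert ((fun q : Int × Int => q.2) q)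
          ((fun (d : PySem.Dict Int (Int × Int × Int)) (q : Int × Int) =>
            (match d.get? q.2 with
              | some (lo, hi, c) => (min lo q.1, max hi q.1, c + 1)
              | none => (q.1, q.1, 1))) d q)) PySem.Dict.empty := rfl
  rw [this, PySem.Dict.keys_foldl_insert_key, PySem.Dict.keys_empty]
  rfl

theorem nodup_keys_levels (pts : List (Int × Int)) :
    (pts.foldl pvStep (PySem.Dict.empty : PySem.Dict Int (Int × Int × Int))).keys.Nodup := by
  have : pts.foldl pvStep (PySem.Dict.empty : PySem.Dict Int (Int × Int × Int))
      = pts.foldl (fun d q => d.insert ((fun q : Int × Int => q.2) q)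
          ((fun (d : PySem.Dict Int (Int × Int × Int)) (q : Int × Int) =>
            (match d.get? q.2 with
              | some (lo, hi, c) => (min lo q.1, max hi q.1, c + 1)
              | none => (q.1, q.1, 1))) d q)) PySem.Dict.empty := rfl
  rw [this]
  exact PySem.Dict.nodup_keys_foldl_insert_key _ _ _ _ (by rw [PySem.Dict.keys_empty]; exact List.nodup_nil)

theorem grp_ne_of_mem {pts : List (Int × Int)} {Y : Int}
    (h : Y ∈ pts.map (fun p => p.2)) : pvGrp pts Y ≠ [] := by
  obtain ⟨p, hp, rfl⟩ := List.mem_map.mp h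
  rw [pvGrp]
  simp only [ne_eq, List.map_eq_nil_iff, List.filter_eq_nil_iff]
  intro hall
  exact absurd (hall p hp) (by simp)

theorem lv_eq (pts : List (Int × Int)) :
    PySem.List.sorted
        (((pts.foldl pvStep (PySem.Dict.empty : PySem.Dict Int (Int × Int × Int))).items.filter
              (fun p => 2 ≤ p.2.2.2)).map (fun p => (p.1, p.2.2.1 - p.2.1)))
        (fun t => t.1)
      = ((pvYs pts).filter (pvKeep pts)).map (pvLv pts) := by
  set D := pts.foldl pvStep (PySem.Dict.empty : PySem.Dict Int (Int × Int × Int)) with hD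
  have hitems : D.items = D.keys.map (fun k => (k, D.getD k (0, 0, 0))) :=
    PySem.Dict.items_eq_map_keys D (nodup_keys_levels pts) (0, 0, 0)
  have hL : ((D.items.filter (fun p => 2 ≤ p.2.2.2)).map (fun p => (p.1, p.2.2.1 - p.2.1)))
      = (D.keys.filter (pvKeep pts)).map (pvLv pts) := by
    rw [hitems, List.filter_map, List.map_map]
    have hfc : ∀ k ∈ D.keys,
        ((fun p : Int × Int × Int × Int => decide ((2:Int) ≤ p.2.2.2)) ∘ (fun k => (k, D.getD k (0, 0, 0)))) k
          = pvKeep pts k := by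
      intro k hk
      have hkm : k ∈ pts.map (fun p => p.2) := by
        rw [keys_levels] at hk
        exact (PySem.Set.mem_ofList _ _).mp hk
      have hgr := grp_ne_of_mem hkm
      have hget := levels_get? pts k
      cases hg : pvGrp pts k with
      | nil => exact absurd hg hgr
      | cons a t =>
        rw [hg] at hget
        have : D.getD k (0, 0, 0) = (t.foldl min a, t.foldl max a, ((a :: t).length : Int)) := by
          show (D.get? k).getD (0, 0, 0) = _
          rw [← hD] at hget
          rw [hget]; rfl
        simp only [Function.comp, this, pvKeep, hg]
        simp only [List.length_cons]
        norm_cast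
    rw [List.filter_congr hfc]
    refine List.map_congr_left (fun k hk => ?_)
    have hk' : k ∈ D.keys := List.mem_of_mem_filter hk
    have hkm : k ∈ pts.map (fun p => p.2) := by
      rw [keys_levels] at hk'
      exact (PySem.Set.mem_ofList _ _).mp hk'
    have hgr := grp_ne_of_mem hkm
    have hget := levels_get? pts k
    cases hg : pvGrp pts k with
    | nil => exact absurd hg hgr
    | cons a t =>
      rw [hg] at hget
      have : D.getD k (0, 0, 0) = (t.foldl min a, t.foldl max a, ((a :: t).length : Int)) := by
        show (D.get? k).getD (0, 0, 0) = _
        rw [← hD] at hget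
        rw [hget]; rfl
      simp only [Function.comp, this, pvLv, pvMx, pvMn, hg]
  rw [hL, keys_levels]
  refine PySem.List.sorted_eq_of_perm_of_pairwise_lt _ _ _ ?_ ?_
  · exact ((PySem.List.sorted_perm _ _ _).filter _).map _
  · have := (PySem.List.sorted_ofList_pairwise_lt (pts.map (fun p => p.2))).filter (pvKeep pts)
    rw [List.pairwise_map]
    exact this.imp (fun h => h)

theorem loops_eq (P : List ((Int × Int) × (Int × Int))) (lv : List (Int × Int))
    (h : lv = P.map (fun pr => (pr.1.2, pr.2.1 - pr.1.1))) :
    (PySem.List.pyRange 0 (P.length : Int)).foldl (fun answer i =>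
        (PySem.List.pyRange (i + 1) (P.length : Int)).foldl (fun answer j =>
          let pri := PySem.List.pyGetD P i ((0, 0), (0, 0))
          let prj := PySem.List.pyGetD P j ((0, 0), (0, 0))
          let a := pri.2.1 - pri.1.1
          let b := prj.2.1 - prj.1.1
          let h := prj.1.2 - pri.1.2
          let s := (a + b) * h
          if answer < s then s else answer) answer) (-1)
      = (PySem.List.pyRange 0 (lv.length : Int)).foldl (fun best i =>
          (PySem.List.pyRange (i + 1) (lv.length : Int)).foldl (fun best j =>
            let s := ((PySem.List.pyGetD lv i (0, 0)).2 + (PySem.List.pyGetD lv j (0, 0)).2)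
                     * ((PySem.List.pyGetD lv j (0, 0)).1 - (PySem.List.pyGetD lv i (0, 0)).1)
            if best < s then s else best) best) (-1) := by
  subst h
  rw [List.length_map]
  refine PySem.List.foldl_congr_mem _ _ _ _ ?_
  intro acc i hi
  obtain ⟨hi0, hilen⟩ := PySem.List.mem_pyRange_one.mp hi
  refine PySem.List.foldl_congr_mem _ _ _ _ ?_
  intro acc2 j hj
  obtain ⟨hj0, hjlen⟩ := PySem.List.mem_pyRange_one.mp hj
  have hj0' : (0 : Int) ≤ j := le_trans (by omega) hj0
  have hgi : PySem.List.pyGetD (P.map (fun pr => (pr.1.2, pr.2.1 - pr.1.1))) i (0, 0)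
      = ((PySem.List.pyGetD P i ((0, 0), (0, 0))).1.2,
         (PySem.List.pyGetD P i ((0, 0), (0, 0))).2.1 - (PySem.List.pyGetD P i ((0, 0), (0, 0))).1.1) := by
    rw [PySem.List.pyGetD_eq_getElem _ _ hi0 (by rwa [List.length_map]),
        PySem.List.pyGetD_eq_getElem _ _ hi0 hilen, List.getElem_map]
  have hgj : PySem.List.pyGetD (P.map (fun pr => (pr.1.2, pr.2.1 - pr.1.1))) j (0, 0)
      = ((PySem.List.pyGetD P j ((0, 0), (0, 0))).1.2,
         (PySem.List.pyGetD P j ((0, 0), (0, 0))).2.1 - (PySem.List.pyGetD P j ((0, 0), (0, 0))).1.1) := by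
    rw [PySem.List.pyGetD_eq_getElem _ _ hj0' (by rwa [List.length_map]),
        PySem.List.pyGetD_eq_getElem _ _ hj0' hjlen, List.getElem_map]
  simp only [hgi, hgj]

-- ===== VERDICT (by name: the statement is the Claim_ definition above) =====
theorem solution_spec : Claim_equal_solution := by
  intro x y hdom hpre
  unfold Spec_solution
  have hpre' : x.length ≤ y.length := hpre
  -- both index loops over range(len(x)) become loops over pts := zip(x, y)
  have hdots : (PySem.List.pyRange 0 (x.length : Int)).foldl
      (fun acc i => acc ++ [(PySem.List.pyGetD x i 0, PySem.List.pyGetD y i 0)]) ([] : List (Int × Int))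
      = x.zip y := by
    refine Eq.trans (foldl_range_zip x y hpre' (fun s a b => s ++ [(a, b)]) []) ?_
    simp only [Prod.mk.eta]
    rw [PySem.List.foldl_append_singleton, List.nil_append]
  have hlevels : (PySem.List.pyRange 0 (x.length : Int)).foldl
      (fun d i =>
        d.insert (PySem.List.pyGetD y i 0)
          (match d.get? (PySem.List.pyGetD y i 0) with
            | some (lo, hi, c) => (min lo (PySem.List.pyGetD x i 0), max hi (PySem.List.pyGetD x i 0), c + 1)
            | none => (PySem.List.pyGetD x i 0, PySem.List.pyGetD x i 0, 1)))
      (PySem.Dict.empty : PySem.Dict Int (Int × Int × Int))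
      = (x.zip y).foldl pvStep PySem.Dict.empty :=
    foldl_range_zip x y hpre'
      (fun (d : PySem.Dict Int (Int × Int × Int)) (a b : Int) =>
        d.insert b
          (match d.get? b with
            | some (lo, hi, c) => (min lo a, max hi a, c + 1)
            | none => (a, a, 1)))
      PySem.Dict.empty
  set pts := x.zip y with hpts
  have hpairs : solutionGroup (PySem.List.sorted (PySem.List.sorted pts (fun k => k.1)) (fun k => k.2))
      = ((pvYs pts).filter (pvKeep pts)).map (fun Y => ((pvMn pts Y, Y), (pvMx pts Y, Y))) := by
    rw [double_sort_eq_canon]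
    exact group_flat pts (pvYs pts)
      (PySem.List.sorted_ofList_pairwise_lt _)
      (fun Y hY => grp_ne_of_mem ((PySem.Set.mem_ofList _ _).mp ((PySem.List.mem_sorted _ _ _ _).mp hY)))
  have hlv := lv_eq pts
  have hproj : ((pvYs pts).filter (pvKeep pts)).map (pvLv pts)
      = (((pvYs pts).filter (pvKeep pts)).map (fun Y => ((pvMn pts Y, Y), (pvMx pts Y, Y)))).map
          (fun pr => (pr.1.2, pr.2.1 - pr.1.1)) := by
    rw [List.map_map]
    rfl
  simp only [solution, solution_alt, hdots, hlevels, hpairs, hlv, hproj, List.length_map]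
  split_ifs with hcond
  · rfl
  · have L := loops_eq (((pvYs pts).filter (pvKeep pts)).map (fun Y => ((pvMn pts Y, Y), (pvMx pts Y, Y)))) _ rfl
    simp only [List.length_map] at L
    exact L
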